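-- pv_equiv track=rewrite | github.com/Cristinutaa/TextIndexing | MergeBased.py | getIndiceFileMinLine
-- ===== SOURCE A (Python) =====
-- def getIndiceFileMinLine(the_first_line):
--     tokens = []
--     for i in range(0, len(the_first_line)):
--         tokens.append((the_first_line[i].split('|'))[0])
--
--     sorted_lines = sorted(tokens);
--
--     ''' delete spaces( <=> empty lines ) from the first line  '''
--     while '' in sorted_lines: sorted_lines.remove('')
--
--     return tokens.index(sorted_lines[0])
-- ===== SOURCE B (Python) =====
-- def getIndiceFileMinLine(the_first_line):
--     best_tok = None
--     best_index = 0
--     for i, line in enumerate(the_first_line):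
--         tok = line.split('|')[0]
--         if tok == '':
--             continue
--         if best_tok is None or tok < best_tok:
--             best_tok = tok
--             best_index = i
--     if best_tok is None:
--         raise IndexError('list index out of range')
--     return best_index
-- ===== Notes on version B (the rewrite author's own statement) =====
-- stated objective: alternative
-- what changed: A builds the token list, sorts it, strips empty tokens with a while/remove loop and re-scans with list.index; B does one pass that tracks the smallest non-empty first token and its earliest index, never sorting.
import Mathlib
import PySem

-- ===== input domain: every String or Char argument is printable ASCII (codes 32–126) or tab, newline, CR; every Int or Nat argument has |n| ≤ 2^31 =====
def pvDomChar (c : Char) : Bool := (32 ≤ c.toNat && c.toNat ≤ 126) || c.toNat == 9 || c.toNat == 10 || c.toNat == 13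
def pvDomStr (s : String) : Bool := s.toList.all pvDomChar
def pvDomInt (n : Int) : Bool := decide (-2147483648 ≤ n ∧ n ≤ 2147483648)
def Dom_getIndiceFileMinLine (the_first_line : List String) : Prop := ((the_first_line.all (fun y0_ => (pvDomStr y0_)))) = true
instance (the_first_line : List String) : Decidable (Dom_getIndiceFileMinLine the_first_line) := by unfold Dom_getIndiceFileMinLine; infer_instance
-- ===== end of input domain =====

-- B replaces A's build-sort-scrub-index pipeline with a single explicit pass that keeps the
-- smallest non-empty first token and its earliest index (objective: alternative, no sort).

-- ===== PORT A =====
-- line.split('|')[0]: sep '|' ≠ "" so split? is some; a '|'-split is never empty so index 0 is in range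
def pvTok (s : String) : String := PySem.List.pyGetD ((PySem.Str.split? s "|").getD []) 0 ""

-- `while '' in sorted_lines: sorted_lines.remove('')`; list.remove('') with '' present removes the
-- first occurrence, i.e. List.erase (PySem.List.remove?_eq_some_erase)
def pvScrub (xs : List String) : List String :=
  if h : "" ∈ xs then pvScrub (xs.erase "") else xs
termination_by xs.length
decreasing_by
  have h1 := List.length_erase_of_mem h
  have h2 : 0 < xs.length := List.length_pos_of_mem h
  omega

def getIndiceFileMinLine (the_first_line : List String) : Int :=
  let tokens := (PySem.List.pyRange 0 (the_first_line.length : Int) 1).foldl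
      (fun acc i => acc ++ [pvTok (PySem.List.pyGetD the_first_line i "")]) []
  let sorted_lines := pvScrub (PySem.List.sorted tokens (fun x => x) false)
  match PySem.List.pyGet? sorted_lines 0 with
  | none => 0      -- IndexError: excluded by Pre_
  | some m =>
    match PySem.List.index? tokens m with
    | none => 0    -- ValueError: never happens (m is one of the tokens)
    | some k => (k : Int)

-- ===== PORT B =====
def getIndiceFileMinLine_alt (the_first_line : List String) : Int :=
  let r := (PySem.List.enumerate the_first_line 0).foldl
      (fun st p =>
        if pvTok p.2 = "" then st
        else
          match st with
          | none => some (pvTok p.2, p.1)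
          | some (bt, bi) => if pvTok p.2 < bt then some (pvTok p.2, p.1) else some (bt, bi))
      (none : Option (String × Int))
  match r with
  | none => 0      -- raise IndexError: excluded by Pre_
  | some (_, bi) => bi

-- ===== PRECONDITION & SPEC =====
-- Pre_ excludes exactly the inputs whose every line has an empty first '|'-token (including the
-- empty list): there A raises IndexError (and B raises IndexError too).
def Pre_getIndiceFileMinLine (the_first_line : List String) : Prop :=
  ∃ s ∈ the_first_line, pvTok s ≠ ""
instance (the_first_line : List String) : Decidable (Pre_getIndiceFileMinLine the_first_line) := by
  unfold Pre_getIndiceFileMinLine; infer_instance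

def pvWitness_getIndiceFileMinLine : List String := ["b|x", "a|y", "a|z", ""]

def Spec_getIndiceFileMinLine (the_first_line : List String) (out : Int) : Prop := out = getIndiceFileMinLine_alt the_first_line
instance (the_first_line : List String) (out : Int) : Decidable (Spec_getIndiceFileMinLine the_first_line out) := by unfold Spec_getIndiceFileMinLine; infer_instance

-- ===== CLAIM (what is proved, stated in full; the proofs are below) =====
def Claim_equal_getIndiceFileMinLine : Prop := ∀ (the_first_line : List String), Dom_getIndiceFileMinLine the_first_line → Pre_getIndiceFileMinLine the_first_line → Spec_getIndiceFileMinLine the_first_line (getIndiceFileMinLine the_first_line)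

-- ===== LEMMAS AND PROOFS =====

-- the "non-empty string" predicate both pipelines filter by
def pvNE (s : String) : Bool := !(s == "")

-- reference recursion: leftmost minimal non-empty token with its index, counting from k
def pvBest : List String → Int → Option (String × Int)
  | [], _ => none
  | x :: l, k =>
    match pvBest l (k + 1) with
    | none => if pvTok x = "" then none else some (pvTok x, k)
    | some (m, i) => if pvTok x ≠ "" ∧ pvTok x ≤ m then some (pvTok x, k) else some (m, i)

lemma pvFilter_erase_empty (xs : List String) : (xs.erase "").filter pvNE = xs.filter pvNE := by
  induction xs with
  | nil => simp
  | cons x xs ih =>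
    by_cases hx : x = ""
    · subst hx; simp [pvNE]
    · simp [List.erase_cons, hx, List.filter_cons, ih]

lemma pvScrub_eq_filter (xs : List String) : pvScrub xs = xs.filter pvNE := by
  induction xs using pvScrub.induct with
  | case1 xs h ih => rw [pvScrub, dif_pos h, ih, pvFilter_erase_empty]
  | case2 xs h =>
    rw [pvScrub, dif_neg h, Eq.comm, List.filter_eq_self]
    intro a ha
    simp only [pvNE, Bool.not_eq_eq_eq_not, Bool.not_true, beq_eq_false_iff_ne, ne_eq]
    rintro rfl; exact h ha

lemma pvFoldl_min_eq_min (t : List String) (a m : String)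
    (h : PySem.List.min? t (fun x => x) = some m) : t.foldl min a = min a m := by
  have h1 := PySem.List.foldl_min_le t a
  have h2 := PySem.List.min?_isMin h
  apply le_antisymm
  · exact le_min h1.1 (h1.2 m (PySem.List.min?_mem h))
  · rcases PySem.List.foldl_min_mem t a with he | he
    · rw [he]; exact min_le_left _ _
    · exact le_trans (min_le_right a m) (h2 _ he)

lemma pvBest_eq (l : List String) (k : Int) :
    pvBest l k = match PySem.List.min? ((l.map pvTok).filter pvNE) (fun x => x) with
      | none => none
      | some m => some (m, k + (((PySem.List.index? (l.map pvTok) m).getD 0 : Nat) : Int)) := by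
  induction l generalizing k with
  | nil => simp [pvBest, PySem.List.min?]
  | cons x l ih =>
    rw [pvBest, ih (k+1)]
    by_cases hx : pvTok x = ""
    · have hne : pvNE (pvTok x) = false := by simp [pvNE, hx]
      simp only [List.map_cons, List.filter_cons, hne, Bool.false_eq_true, ite_false]
      cases hmin : PySem.List.min? ((l.map pvTok).filter pvNE) (fun x => x) with
      | none => simp [hx]
      | some m =>
        have hmne : ¬ (pvTok x = m) := by
          have h1 : pvNE m = true := List.of_mem_filter (PySem.List.min?_mem hmin)
          simp only [pvNE, Bool.not_eq_eq_eq_not, Bool.not_true, beq_eq_false_iff_ne, ne_eq] at h1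
          rw [hx]; exact fun h => h1 h.symm
        obtain ⟨j, hj⟩ : ∃ j, PySem.List.index? (l.map pvTok) m = some j :=
          Option.isSome_iff_exists.mp ((PySem.List.index?_isSome_iff _ m).mpr
            (List.mem_of_mem_filter (PySem.List.min?_mem hmin)))
        rw [PySem.List.index?_eq_idxOf?] at hj
        have hm0 : ¬ ("" = m) := fun h => hmne (hx.trans h)
        simp [hx, List.idxOf?_cons, hm0, hj]
        omega
    · have hne : pvNE (pvTok x) = true := by simp [pvNE, hx]
      simp only [List.map_cons, List.filter_cons, hne, ite_true]
      rw [PySem.List.min?_id_cons]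
      cases hmin : PySem.List.min? ((l.map pvTok).filter pvNE) (fun x => x) with
      | none =>
        have he : (l.map pvTok).filter pvNE = [] := (PySem.List.min?_eq_none_iff _ _).mp hmin
        rw [he]
        simp [hx, List.idxOf?_cons]
      | some m =>
        rw [pvFoldl_min_eq_min _ _ _ hmin]
        by_cases hle : pvTok x ≤ m
        · rw [min_eq_left hle]
          simp [hx, hle, List.idxOf?_cons]
        · have hlt : m < pvTok x := lt_of_not_ge hle
          rw [min_eq_right (le_of_lt hlt)]
          have hmne : ¬ (pvTok x = m) := fun h => absurd (h ▸ hlt) (lt_irrefl _)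
          obtain ⟨j, hj⟩ : ∃ j, PySem.List.index? (l.map pvTok) m = some j :=
            Option.isSome_iff_exists.mp ((PySem.List.index?_isSome_iff _ m).mpr
              (List.mem_of_mem_filter (PySem.List.min?_mem hmin)))
          rw [PySem.List.index?_eq_idxOf?] at hj
          simp [hx, hle, List.idxOf?_cons, hmne, hj]
          omega

def pvCombine (st b : Option (String × Int)) : Option (String × Int) :=
  match st, b with
  | none, b => b
  | some s, none => some s
  | some (bt, bi), some (m, i) => if m < bt then some (m, i) else some (bt, bi)

lemma pvFold_eq (l : List String) (k : Int) (st : Option (String × Int)) :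
    (PySem.List.enumerate l k).foldl
      (fun st p =>
        if pvTok p.2 = "" then st
        else
          match st with
          | none => some (pvTok p.2, p.1)
          | some (bt, bi) => if pvTok p.2 < bt then some (pvTok p.2, p.1) else some (bt, bi)) st
    = pvCombine st (pvBest l k) := by
  induction l generalizing k st with
  | nil =>
    cases st with
    | none => simp [PySem.List.enumerate, pvBest, pvCombine]
    | some s => simp [PySem.List.enumerate, pvBest, pvCombine]
  | cons x l ih =>
    rw [PySem.List.enumerate_cons, List.foldl_cons, ih, pvBest]
    by_cases hx : pvTok x = ""
    · simp only [hx, ite_true, if_pos]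
      cases hb : pvBest l (k + 1) with
      | none => simp [pvCombine]
      | some mi =>
        obtain ⟨m, i⟩ := mi
        simp
    · simp only [hx, ite_false]
      cases hb : pvBest l (k + 1) with
      | none =>
        cases st with
        | none => simp [hx, pvCombine]
        | some s =>
          obtain ⟨bt, bi⟩ := s
          by_cases hlt : pvTok x < bt <;> simp [hx, hlt, pvCombine]
      | some mi =>
        obtain ⟨m, i⟩ := mi
        cases st with
        | none =>
          by_cases hle : pvTok x ≤ m
          · simp [hx, hle, pvCombine, not_lt_of_ge hle]
          · have hlt : m < pvTok x := lt_of_not_ge hle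
            simp [hx, hle, pvCombine, hlt]
        | some s =>
          obtain ⟨bt, bi⟩ := s
          by_cases hle : pvTok x ≤ m
          · by_cases hlt : pvTok x < bt
            · have h1 : ¬ m < pvTok x := not_lt_of_ge hle
              simp [hx, hle, hlt, pvCombine, h1]
            · have h1 : ¬ m < bt := not_lt_of_ge (le_trans (le_of_not_gt hlt) hle)
              simp [hx, hle, hlt, pvCombine, h1]
          · have hmlt : m < pvTok x := lt_of_not_ge hle
            by_cases hlt : pvTok x < bt
            · have h2 : m < bt := lt_trans hmlt hlt
              simp [hx, hle, hlt, pvCombine, hmlt, h2]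
            · simp [hx, hle, hlt, pvCombine]

-- ===== VERDICT (by name: the statement is the Claim_ definition above) =====
theorem getIndiceFileMinLine_spec : Claim_equal_getIndiceFileMinLine := by
  intro l _hdom hpre
  unfold Spec_getIndiceFileMinLine
  obtain ⟨s, hs, hsne⟩ := hpre
  have htok : (PySem.List.pyRange 0 (l.length : Int) 1).foldl
      (fun acc i => acc ++ [pvTok (PySem.List.pyGetD l i "")]) [] = l.map pvTok := by
    rw [PySem.List.foldl_pyRange_zero_pyGetD' l "" (fun acc x => acc ++ [pvTok x]) [],
        PySem.List.foldl_append_singleton_eq_map pvTok l []]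
    rfl
  -- the sorted-then-scrubbed list is nonempty; name its head
  have hSne : (PySem.List.sorted (l.map pvTok) (fun x => x) false).filter pvNE ≠ [] := by
    have hy : pvTok s ∈ (PySem.List.sorted (l.map pvTok) (fun x => x) false) :=
      (PySem.List.mem_sorted _ _ _ _).mpr (List.mem_map_of_mem hs)
    intro h
    have hmem : pvTok s ∈ (PySem.List.sorted (l.map pvTok) (fun x => x) false).filter pvNE :=
      List.mem_filter.mpr ⟨hy, by simpa [pvNE] using hsne⟩
    rw [h] at hmem
    exact (List.not_mem_nil).elim hmem
  cases hS : (PySem.List.sorted (l.map pvTok) (fun x => x) false).filter pvNE with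
  | nil => exact absurd hS hSne
  | cons h t =>
    have hperm : ((PySem.List.sorted (l.map pvTok) (fun x => x) false).filter pvNE).Perm
        ((l.map pvTok).filter pvNE) := (PySem.List.sorted_perm (l.map pvTok) _ false).filter pvNE
    have hPair : ((PySem.List.sorted (l.map pvTok) (fun x => x) false).filter pvNE).Pairwise
        (fun a b => a ≤ b) :=
      (PySem.List.sorted_pairwise (l.map pvTok) (fun x => x)).sublist List.filter_sublist
    have hhead_le : ∀ y ∈ (l.map pvTok).filter pvNE, h ≤ y := by
      intro y hy
      have hy' : y ∈ h :: t := hS ▸ hperm.symm.subset (by exact hy)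
      rcases List.mem_cons.mp hy' with rfl | hy'
      · exact le_refl _
      · exact (List.pairwise_cons.mp (hS ▸ hPair)).1 y hy'
    have hhF : h ∈ (l.map pvTok).filter pvNE :=
      hperm.subset (hS ▸ List.mem_cons_self)
    -- the min? of the unsorted filtered tokens is exactly h
    obtain ⟨m, hm⟩ : ∃ m, PySem.List.min? ((l.map pvTok).filter pvNE) (fun x => x) = some m := by
      cases hmin : PySem.List.min? ((l.map pvTok).filter pvNE) (fun x => x) with
      | none =>
        have := (PySem.List.min?_eq_none_iff _ _).mp hmin
        rw [this] at hhF
        exact (List.not_mem_nil).elim hhF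
      | some m => exact ⟨m, rfl⟩
    have hmh : m = h :=
      le_antisymm (PySem.List.min?_isMin hm h hhF) (hhead_le m (PySem.List.min?_mem hm))
    subst hmh
    have hmts : m ∈ l.map pvTok := List.mem_of_mem_filter hhF
    obtain ⟨j, hj⟩ : ∃ j, PySem.List.index? (l.map pvTok) m = some j :=
      Option.isSome_iff_exists.mp ((PySem.List.index?_isSome_iff _ m).mpr hmts)
    -- evaluate port A
    have hA : getIndiceFileMinLine l = (j : Int) := by
      unfold getIndiceFileMinLine
      simp only [htok, pvScrub_eq_filter, hS, PySem.List.pyGet?_zero_cons, hj]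
    -- evaluate port B
    have hB : getIndiceFileMinLine_alt l = (j : Int) := by
      unfold getIndiceFileMinLine_alt
      simp only [pvFold_eq l 0, pvBest_eq l 0, hm, hj]
      show (0 : Int) + (j : Int) = (j : Int)
      omega
    rw [hA, hB]
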